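-- pv_equiv track=rewrite | github.com/haveyouheardofthehighelves/ImaginaryGraphVisualization | expansion.py | transform
-- ===== SOURCE A (Python) =====
-- def transform(pretrans):
--     newstring = ""
--     for i in pretrans:
--         if i == 'a':
--             newstring += "(a*i)"
--         elif i == 'b':
--             newstring += "(b*i)"
--         else:
--             newstring += i
--     return newstring
-- ===== SOURCE B (Python) =====
-- def transform(pretrans):
--     return pretrans.replace('a', '(a*i)').replace('b', '(b*i)')
-- ===== Notes on version B (the rewrite author's own statement) =====
-- stated objective: idiomatic
-- what changed: Replaces the char-by-char accumulation loop with two chained str.replace passes (one full scan per target symbol); safe because neither replacement string contains a not-yet-processed target character.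
import Mathlib
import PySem

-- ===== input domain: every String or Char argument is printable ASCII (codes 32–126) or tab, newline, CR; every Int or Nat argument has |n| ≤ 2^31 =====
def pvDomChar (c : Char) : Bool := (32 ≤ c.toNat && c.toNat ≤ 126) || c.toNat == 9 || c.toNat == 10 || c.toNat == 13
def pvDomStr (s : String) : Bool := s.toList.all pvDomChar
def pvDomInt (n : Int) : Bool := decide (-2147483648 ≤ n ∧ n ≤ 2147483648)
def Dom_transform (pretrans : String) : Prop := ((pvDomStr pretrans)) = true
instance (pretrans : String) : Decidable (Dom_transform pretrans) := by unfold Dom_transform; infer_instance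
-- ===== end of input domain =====

-- B replaces A's char-by-char accumulation loop with two chained str.replace passes (idiomatic).

-- ===== PORT A =====
def transform (pretrans : String) : String :=
  pretrans.toList.foldl
    (fun newstring i =>
      if i = 'a' then newstring ++ "(a*i)"
      else if i = 'b' then newstring ++ "(b*i)"
      else newstring.push i) ""

-- ===== PORT B =====
def transform_alt (pretrans : String) : String :=
  PySem.Str.replace (PySem.Str.replace pretrans "a" "(a*i)") "b" "(b*i)"

-- ===== PRECONDITION & SPEC =====
def Spec_transform (pretrans : String) (out : String) : Prop := out = transform_alt pretrans
instance (pretrans : String) (out : String) : Decidable (Spec_transform pretrans out) := by unfold Spec_transform; infer_instance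

-- ===== CLAIM (what is proved, stated in full; the proofs are below) =====
def Claim_equal_transform : Prop := ∀ (pretrans : String), Dom_transform pretrans → Spec_transform pretrans (transform pretrans)

-- ===== LEMMAS AND PROOFS =====

-- single-character substitution as a flatMap
def pvSubst (o : Char) (new : List Char) (c : Char) : List Char :=
  if c = o then new else [c]

theorem pvReplace_go_single (o : Char) (new : List Char) :
    ∀ (l : List Char) (fuel : Nat) (acc : List Char), l.length ≤ fuel →
      PySem.Chars.replace.go [o] new fuel l acc =
        acc.reverse ++ l.flatMap (pvSubst o new) := by
  intro l
  induction l with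
  | nil =>
      intro fuel acc _
      cases fuel <;> simp [PySem.Chars.replace.go]
  | cons c t ih =>
      intro fuel acc h
      cases fuel with
      | zero => simp at h
      | succ n =>
          simp only [List.length_cons, Nat.succ_le_succ_iff] at h
          by_cases hc : c = o
          · subst hc
            have hpre : List.isPrefixOf [c] (c :: t) = true := by
              simp [List.isPrefixOf]
            simp [PySem.Chars.replace.go, hpre, ih n _ h, pvSubst]
          · have hpre : List.isPrefixOf [o] (c :: t) = false := by
              simp [List.isPrefixOf]
              exact fun h' => (hc h'.symm).elim
            simp [PySem.Chars.replace.go, hpre, ih n _ h, pvSubst, hc]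

theorem pvReplace_single (o : Char) (new : List Char) (l : List Char) :
    PySem.Chars.replace l [o] new = l.flatMap (pvSubst o new) := by
  have := pvReplace_go_single o new l l.length [] (le_refl _)
  simpa [PySem.Chars.replace] using this

theorem pvSubst_comp (c : Char) :
    (pvSubst 'a' "(a*i)".toList c).flatMap (pvSubst 'b' "(b*i)".toList)
      = if c = 'a' then "(a*i)".toList
        else if c = 'b' then "(b*i)".toList
        else [c] := by
  by_cases ha : c = 'a'
  · subst ha; decide
  · by_cases hb : c = 'b'
    · subst hb; decide
    · simp [pvSubst, ha, hb]

theorem pvFoldA (cs : List Char) :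
    ∀ (acc : String),
      (cs.foldl
        (fun newstring i =>
          if i = 'a' then newstring ++ "(a*i)"
          else if i = 'b' then newstring ++ "(b*i)"
          else newstring.push i) acc).toList
        = acc.toList ++ cs.flatMap (fun c =>
            if c = 'a' then "(a*i)".toList
            else if c = 'b' then "(b*i)".toList
            else [c]) := by
  induction cs with
  | nil => intro acc; simp
  | cons c t ih =>
      intro acc
      by_cases ha : c = 'a'
      · subst ha; simp [ih]
      · by_cases hb : c = 'b'
        · subst hb; simp [ih, ha]
        · simp [ih, ha, hb]

-- ===== VERDICT (by name: the statement is the Claim_ definition above) =====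
theorem transform_spec : Claim_equal_transform := by
  intro pretrans _
  unfold Spec_transform transform transform_alt
  have hB : (PySem.Str.replace (PySem.Str.replace pretrans "a" "(a*i)") "b" "(b*i)").toList
      = pretrans.toList.flatMap (fun c =>
          if c = 'a' then "(a*i)".toList
          else if c = 'b' then "(b*i)".toList
          else [c]) := by
    rw [PySem.Str.toList_replace, PySem.Str.toList_replace]
    have h1 : ("a" : String).toList = ['a'] := rfl
    have h2 : ("b" : String).toList = ['b'] := rfl
    rw [h1, h2, pvReplace_single, pvReplace_single, List.flatMap_assoc]
    exact List.flatMap_congr (fun c _ => pvSubst_comp c)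
  have hA := pvFoldA pretrans.toList ""
  have : (pretrans.toList.foldl
      (fun newstring i =>
        if i = 'a' then newstring ++ "(a*i)"
        else if i = 'b' then newstring ++ "(b*i)"
        else newstring.push i) "").toList
      = (PySem.Str.replace (PySem.Str.replace pretrans "a" "(a*i)") "b" "(b*i)").toList := by
    rw [hA, hB]; simp
  have h2 := congrArg String.ofList this
  rwa [String.ofList_toList, String.ofList_toList] at h2
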